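-- pv_equiv track=rewrite | github.com/cmm25/free-genai-bootcamp-2025 | WEEK2/Listening-app/backend/audiogeneration.py | _create_default_conversation
-- ===== SOURCE A (Python) =====
-- from typing import Dict, List, Tuple
--
-- def _create_default_conversation(question: Dict) -> List[Tuple[str, str, str]]:
--     """Create a default conversation structure when generation fails"""
--     parts = []
--
--     # Add announcer intro
--     parts.append(
--         ("Announcer", "Sikiliza mazungumzo yafuatayo kisha ujibu maswali.", "male"))
--
--     # Extract conversation if available
--     if "Conversation" in question:
--         # Split conversation into parts
--         conversation = question["Conversation"]
--         lines = conversation.split("\n")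
--
--         speaker_gender = {"Speaker1": "male", "Speaker2": "female"}
--         current_speaker = "Speaker1"
--
--         for line in lines:
--             line = line.strip()
--             if line:
--                 parts.append(
--                     (current_speaker, line, speaker_gender[current_speaker]))
--                 # Alternate speakers
--                 current_speaker = "Speaker2" if current_speaker == "Speaker1" else "Speaker1"
--
--     # Add question
--     if "Question" in question:
--         parts.append(("Announcer", question["Question"], "male"))
--
--     return parts
-- ===== SOURCE B (Python) =====
-- def _pairs(ls):
--     """Emit one Speaker1/Speaker2 pair per recursive step; no speaker state."""
--     if not ls:
--         return []
--     if len(ls) == 1: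
--         return [("Speaker1", ls[0], "male")]
--     return [("Speaker1", ls[0], "male"),
--             ("Speaker2", ls[1], "female")] + _pairs(ls[2:])
--
-- def _create_default_conversation(question):
--     parts = [("Announcer", "Sikiliza mazungumzo yafuatayo kisha ujibu maswali.", "male")]
--     if "Conversation" in question:
--         lines = [l.strip() for l in question["Conversation"].split("\n") if l.strip()]
--         parts += _pairs(lines)
--     if "Question" in question:
--         parts.append(("Announcer", question["Question"], "male"))
--     return parts
-- ===== Notes on version B (the rewrite author's own statement) =====
-- stated objective: alternative
-- what changed: Replaced A's single stateful pass carrying a current_speaker toggle and a gender dict with a pre-filter of the stripped non-empty lines followed by a recursive helper that consumes the filtered lines two at a time, emitting a fixed Speaker1/Speaker2 pair per step, with no speaker state or dict lookup.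
import Mathlib
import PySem

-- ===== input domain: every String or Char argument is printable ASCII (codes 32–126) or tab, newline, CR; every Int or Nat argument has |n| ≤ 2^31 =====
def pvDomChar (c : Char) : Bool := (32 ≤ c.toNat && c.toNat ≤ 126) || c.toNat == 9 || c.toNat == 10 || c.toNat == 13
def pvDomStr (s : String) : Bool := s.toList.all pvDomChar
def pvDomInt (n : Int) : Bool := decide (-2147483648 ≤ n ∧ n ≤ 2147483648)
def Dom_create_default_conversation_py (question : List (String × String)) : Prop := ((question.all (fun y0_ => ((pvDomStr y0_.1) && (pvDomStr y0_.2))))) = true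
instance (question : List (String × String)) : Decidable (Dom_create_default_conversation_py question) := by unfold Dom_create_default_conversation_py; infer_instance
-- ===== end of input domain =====

-- B replaces A's stateful speaker-toggle pass with a pre-filter plus a pairwise recursion consuming two lines per step (no speaker state); objective: alternative, same cost.


-- ===== PORT A =====
-- the loop body: strip, append with the current speaker's gender (dict lookup), toggle speaker
def cdcA_step (st : List (String × String × String) × String) (line : String) :
    List (String × String × String) × String :=
  let l := PySem.Str.strip line
  if l ≠ "" then
    (st.1 ++ [(st.2, l,
        (PySem.Dict.ofList [("Speaker1", "male"), ("Speaker2", "female")]).getD st.2 "")],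
     if st.2 == "Speaker1" then "Speaker2" else "Speaker1")
  else st

def create_default_conversation_py (question : List (String × String)) :
    List (String × String × String) :=
  let d := PySem.Dict.ofList question
  let parts : List (String × String × String) :=
    [("Announcer", "Sikiliza mazungumzo yafuatayo kisha ujibu maswali.", "male")]
  let parts :=
    if d.contains "Conversation" then
      let lines := (PySem.Str.split? (d.getD "Conversation" "") "\n").getD []
      (lines.foldl cdcA_step (parts, "Speaker1")).1
    else parts
  if d.contains "Question" then parts ++ [("Announcer", d.getD "Question" "", "male")]
  else parts

-- ===== PORT B =====
-- recursive helper consuming two filtered lines per step (Source B's _pairs)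
def cdcPairs : List String → List (String × String × String)
  | [] => []
  | [a] => [("Speaker1", a, "male")]
  | a :: b :: t =>
      ("Speaker1", a, "male") :: ("Speaker2", b, "female") :: cdcPairs t

def create_default_conversation_py_alt (question : List (String × String)) :
    List (String × String × String) :=
  let d := PySem.Dict.ofList question
  let parts : List (String × String × String) :=
    [("Announcer", "Sikiliza mazungumzo yafuatayo kisha ujibu maswali.", "male")]
  let parts :=
    if d.contains "Conversation" then
      parts ++ cdcPairs
        ((((PySem.Str.split? (d.getD "Conversation" "") "\n").getD []).map
            PySem.Str.strip).filter (fun l => l ≠ ""))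
    else parts
  if d.contains "Question" then parts ++ [("Announcer", d.getD "Question" "", "male")]
  else parts

-- ===== PRECONDITION & SPEC =====
def Spec_create_default_conversation_py (question : List (String × String)) (out : List (String × String × String)) : Prop := out = create_default_conversation_py_alt question
instance (question : List (String × String)) (out : List (String × String × String)) : Decidable (Spec_create_default_conversation_py question out) := by unfold Spec_create_default_conversation_py; infer_instance

-- ===== CLAIM (what is proved, stated in full; the proofs are below) =====
def Claim_equal_create_default_conversation_py : Prop := ∀ (question : List (String × String)), Dom_create_default_conversation_py question → Spec_create_default_conversation_py question (create_default_conversation_py question)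

-- ===== LEMMAS AND PROOFS =====
-- A's step on an already-stripped non-empty line: no strip test left
def cdcStep' (st : List (String × String × String) × String) (l : String) :
    List (String × String × String) × String :=
  (st.1 ++ [(st.2, l,
      (PySem.Dict.ofList [("Speaker1", "male"), ("Speaker2", "female")]).getD st.2 "")],
   if st.2 == "Speaker1" then "Speaker2" else "Speaker1")

-- A's fold over the raw lines equals the fold of cdcStep' over the stripped non-empty lines
lemma cdcA_filter (lines : List String) :
    ∀ (st : List (String × String × String) × String),
    lines.foldl cdcA_step st
      = ((lines.map PySem.Str.strip).filter (fun l => l ≠ "")).foldl cdcStep' st := by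
  induction lines with
  | nil => intro st; simp
  | cons l ls ih =>
    intro st
    by_cases h : PySem.Str.strip l = ""
    · simp [cdcA_step, h, ih]
    · simp only [List.map_cons, List.filter_cons, List.foldl_cons]
      rw [show cdcA_step st l = cdcStep' st (PySem.Str.strip l) by
            simp [cdcA_step, cdcStep', h]]
      simp [h, ih]

-- the cdcStep' fold from Speaker1 produces exactly B's pairwise recursion
lemma cdcFold_pairs (ls : List String) :
    ∀ (acc : List (String × String × String)),
    (ls.foldl cdcStep' (acc, "Speaker1")).1 = acc ++ cdcPairs ls := by
  induction ls using cdcPairs.induct with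
  | case1 => intro acc; simp [cdcPairs]
  | case2 a => intro acc; simp [cdcPairs, cdcStep']; decide
  | case3 a b t ih =>
    intro acc
    simp only [List.foldl_cons]
    rw [show cdcStep' (acc, "Speaker1") a
          = (acc ++ [("Speaker1", a, "male")], "Speaker2") by simp [cdcStep']; decide]
    rw [show cdcStep' (acc ++ [("Speaker1", a, "male")], "Speaker2") b
          = (acc ++ [("Speaker1", a, "male"), ("Speaker2", b, "female")], "Speaker1") by
        simp [cdcStep']; decide]
    rw [ih]
    simp [cdcPairs]

-- ===== VERDICT (by name: the statement is the Claim_ definition above) =====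
theorem create_default_conversation_py_spec : Claim_equal_create_default_conversation_py := by
  unfold Claim_equal_create_default_conversation_py
  intro question _
  unfold Spec_create_default_conversation_py
  unfold create_default_conversation_py create_default_conversation_py_alt
  by_cases hc : (PySem.Dict.ofList question).contains "Conversation" = true <;>
    by_cases hq : (PySem.Dict.ofList question).contains "Question" = true <;>
      simp [hc, hq, cdcA_filter, cdcFold_pairs]
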